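-- pv_equiv track=rewrite | github.com/maiah2142/COSC2531Assignment1 | ProgFunA1_3890409.py | getMostValued
-- ===== SOURCE A (Python) =====
-- def getMostValued(dictTotalSpend:dict, listCustomers:list)->list:
--     listNames = []
--     highest = 0
--     #loops through every customer
--     for names in listCustomers:
--         amount = dictTotalSpend.get(names)
--         #if they have spent anything
--         if amount:
--             #if customer matches the highest spending amount
--             if amount == highest:
--                 #add them to return list
--                 listNames.append(names)
--             #if new highest is found
--             elif amount > highest:
--                 #clear the list and add the new name
--                 listNames.clear()
--                 listNames.append(names)
--                 highest = amount
--     #finally return names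
--     return listNames
-- ===== SOURCE B (Python) =====
-- def getMostValued(dictTotalSpend: dict, listCustomers: list) -> list:
--     # Pass 1: the amounts, aligned with listCustomers.
--     amounts = [dictTotalSpend.get(name) for name in listCustomers]
--     # Highest truthy amount (0 if none).
--     highest = max((a for a in amounts if a), default=0)
--     # Nobody spent a positive amount: nobody beats the initial highest of 0.
--     if highest <= 0:
--         return []
--     # Pass 2: keep everyone whose amount equals the highest, in order.
--     return [name for name, a in zip(listCustomers, amounts) if a == highest]
-- ===== Notes on version B (the rewrite author's own statement) =====
-- stated objective: alternative
-- what changed: Replaces A's single loop that tracks the running maximum and clears/rebuilds the result list with two passes: first compute the highest truthy amount (max with default 0), then filter the customers whose amount equals it.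
import Mathlib
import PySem

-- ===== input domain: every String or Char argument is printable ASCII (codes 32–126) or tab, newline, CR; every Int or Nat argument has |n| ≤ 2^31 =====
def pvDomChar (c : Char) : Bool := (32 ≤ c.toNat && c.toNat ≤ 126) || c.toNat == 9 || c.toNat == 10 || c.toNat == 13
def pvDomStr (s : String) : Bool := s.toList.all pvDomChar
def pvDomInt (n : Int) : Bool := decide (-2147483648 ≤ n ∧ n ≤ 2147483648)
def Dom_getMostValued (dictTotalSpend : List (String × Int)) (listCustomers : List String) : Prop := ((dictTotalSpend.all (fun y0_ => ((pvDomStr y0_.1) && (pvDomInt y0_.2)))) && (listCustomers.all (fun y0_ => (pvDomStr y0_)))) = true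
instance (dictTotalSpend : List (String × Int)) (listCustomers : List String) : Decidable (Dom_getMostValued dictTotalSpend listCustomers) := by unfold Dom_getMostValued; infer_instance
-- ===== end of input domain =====

-- B replaces A's single max-tracking/clearing loop with two passes: compute the
-- highest truthy amount, then filter the customers matching it (objective: alternative).

-- ===== PORT A =====
-- the body of A's for-loop: amount = dict.get(name); if amount: … (state = (listNames, highest))
def pvStepA (g : String → Option Int) (st : List String × Int) (names : String) : List String × Int :=
  match g names with
  | none => st
  | some amount =>
    if amount ≠ 0 then
      if amount = st.2 then (st.1 ++ [names], st.2)
      else if amount > st.2 then ([names], amount)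
      else st
    else st

def getMostValued (dictTotalSpend : List (String × Int)) (listCustomers : List String) : List String :=
  let d := PySem.Dict.ofList dictTotalSpend
  (listCustomers.foldl (pvStepA (fun n => d.get? n)) ([], 0)).1

-- ===== PORT B =====
-- Python truthiness of an Optional[int]: None and 0 are falsy
def pvTruthy (o : Option Int) : Option Int :=
  match o with
  | some a => if a ≠ 0 then some a else none
  | none => none

def getMostValued_alt (dictTotalSpend : List (String × Int)) (listCustomers : List String) : List String :=
  let d := PySem.Dict.ofList dictTotalSpend
  let amounts := listCustomers.map (fun n => d.get? n)
  let vals := amounts.filterMap pvTruthy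
  let highest : Int := match vals with | [] => 0 | x :: xs => xs.foldl max x
  if highest ≤ 0 then []
  else (listCustomers.zip amounts).filterMap (fun p => if p.2 = some highest then some p.1 else none)

-- ===== PRECONDITION & SPEC =====
def Spec_getMostValued (dictTotalSpend : List (String × Int)) (listCustomers : List String) (out : List String) : Prop := out = getMostValued_alt dictTotalSpend listCustomers
instance (dictTotalSpend : List (String × Int)) (listCustomers : List String) (out : List String) : Decidable (Spec_getMostValued dictTotalSpend listCustomers out) := by unfold Spec_getMostValued; infer_instance

-- ===== CLAIM (what is proved, stated in full; the proofs are below) =====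
def Claim_equal_getMostValued : Prop := ∀ (dictTotalSpend : List (String × Int)) (listCustomers : List String), Dom_getMostValued dictTotalSpend listCustomers → Spec_getMostValued dictTotalSpend listCustomers (getMostValued dictTotalSpend listCustomers)

-- ===== LEMMAS AND PROOFS =====

-- the running maximum A's loop maintains
def pvHmax (g : String → Option Int) (cs : List String) (h : Int) : Int :=
  cs.foldl (fun h n => match pvTruthy (g n) with | some a => max h a | none => h) h

-- the customers whose amount is exactly M
def pvCollect (g : String → Option Int) (M : Int) (cs : List String) : List String :=
  cs.filterMap (fun n => if g n = some M then some n else none)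

lemma pvHmax_cons (g : String → Option Int) (n : String) (cs : List String) (h : Int) :
    pvHmax g (n :: cs) h = pvHmax g cs (match pvTruthy (g n) with | some a => max h a | none => h) := rfl

lemma pvHmax_ge (g : String → Option Int) (cs : List String) (h : Int) : h ≤ pvHmax g cs h := by
  induction cs generalizing h with
  | nil => simp [pvHmax]
  | cons n cs ih =>
    rw [pvHmax_cons]
    cases pvTruthy (g n) with
    | none => exact ih h
    | some a => exact le_trans (le_max_left h a) (ih (max h a))

-- characterisation of A's loop from any state (L, h) with 0 ≤ h
lemma pvFoldA_char (g : String → Option Int) (cs : List String) (L : List String) (h : Int)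
    (hh : 0 ≤ h) :
    cs.foldl (pvStepA g) (L, h)
      = ((if pvHmax g cs h = h then L else []) ++
          (if pvHmax g cs h = 0 then [] else pvCollect g (pvHmax g cs h) cs),
         pvHmax g cs h) := by
  induction cs generalizing L h with
  | nil => simp [pvHmax, pvCollect]
  | cons n cs ih =>
    have hcol : ∀ M, pvCollect g M (n :: cs)
        = (if g n = some M then [n] else []) ++ pvCollect g M cs := by
      intro M
      simp only [pvCollect, List.filterMap_cons]
      split_ifs with h1 <;> simp
    rw [List.foldl_cons, pvHmax_cons]
    cases hg : g n with
    | none =>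
      have hst : pvStepA g (L, h) n = (L, h) := by simp [pvStepA, hg]
      have ht : (match pvTruthy none with | some a => max h a | none => h) = h := rfl
      rw [hst, ht, ih L h hh]
      have hng : ∀ M, (if g n = some M then [n] else []) = ([] : List String) := by
        intro M; simp [hg]
      simp [hcol, hng]
    | some a =>
      by_cases ha0 : a = 0
      · have hst : pvStepA g (L, h) n = (L, h) := by simp [pvStepA, hg, ha0]
        have ht : (match pvTruthy (some a) with | some a => max h a | none => h) = h := by
          subst ha0; rfl
        rw [hst, ht, ih L h hh]
        congr 1
        by_cases hM0 : pvHmax g cs h = 0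
        · simp [hM0]
        · have hgn : ¬ (g n = some (pvHmax g cs h)) := by
            rw [hg]; intro hc; injection hc with hc; omega
          simp [hM0, hcol, hgn]
      · have ht : (match pvTruthy (some a) with | some a' => max h a' | none => h) = max h a := by
          simp [pvTruthy, ha0]
        rw [ht]
        by_cases hah : a = h
        · have hh0 : h ≠ 0 := by omega
          have hst : pvStepA g (L, h) n = (L ++ [n], h) := by
            simp [pvStepA, hg, hah, hh0]
          have hmaxh : max h a = h := by omega
          rw [hst, hmaxh, ih (L ++ [n]) h hh]
          have hMh : h ≤ pvHmax g cs h := pvHmax_ge g cs h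
          congr 1
          by_cases hMeq : pvHmax g cs h = h
          · have hM0 : pvHmax g cs h ≠ 0 := by omega
            simp [hMeq, hcol, hg, hah, hh0, List.append_assoc]
          · have hM0 : pvHmax g cs h ≠ 0 := by omega
            have hgn : ¬ (g n = some (pvHmax g cs h)) := by
              rw [hg]; intro hc; injection hc with hc; omega
            simp [hMeq, hM0, hcol, hgn]
        · by_cases hagt : a > h
          · have hst : pvStepA g (L, h) n = ([n], a) := by
              simp [pvStepA, hg, ha0, hah, hagt]
            have hmaxh : max h a = a := by omega
            rw [hst, hmaxh, ih [n] a (by omega)]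
            have hMa : a ≤ pvHmax g cs a := pvHmax_ge g cs a
            have hMh : pvHmax g cs a ≠ h := by omega
            have hM0 : pvHmax g cs a ≠ 0 := by omega
            congr 1
            by_cases hMeq : pvHmax g cs a = a
            · simp [hMeq, hcol, hg, ha0, hah]
            · have hgn : ¬ (g n = some (pvHmax g cs a)) := by
                rw [hg]; intro hc; injection hc with hc; omega
              simp [hMeq, hMh, hM0, hcol, hgn]
          · have hst : pvStepA g (L, h) n = (L, h) := by
              simp [pvStepA, hg, ha0, hah, hagt]
            have hmaxh : max h a = h := by omega
            rw [hst, hmaxh, ih L h hh]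
            have hMh : h ≤ pvHmax g cs h := pvHmax_ge g cs h
            have hgn : ¬ (g n = some (pvHmax g cs h)) := by
              rw [hg]; intro hc; injection hc with hc; omega
            simp [hcol, hgn]

-- pvHmax is a fold of max over the truthy values
lemma pvHmax_eq_foldl_max (g : String → Option Int) (cs : List String) (h : Int) :
    pvHmax g cs h = ((cs.map g).filterMap pvTruthy).foldl max h := by
  induction cs generalizing h with
  | nil => rfl
  | cons n cs ih =>
    rw [pvHmax_cons, List.map_cons, List.filterMap_cons]
    cases pvTruthy (g n) with
    | none => exact ih h
    | some a => exact ih (max h a)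

lemma foldl_max_pull (xs : List Int) (h x : Int) :
    xs.foldl max (max h x) = max h (xs.foldl max x) := by
  induction xs generalizing x with
  | nil => rfl
  | cons y ys ih =>
    simp only [List.foldl_cons]
    rw [max_assoc, ih]

lemma pvZip_filterMap (g : String → Option Int) (cs : List String) (H : Int) :
    (cs.zip (cs.map g)).filterMap (fun p => if p.2 = some H then some p.1 else none)
      = pvCollect g H cs := by
  induction cs with
  | nil => rfl
  | cons n cs ih =>
    simp only [List.map_cons, List.zip_cons_cons, List.filterMap_cons, pvCollect] at *
    split_ifs <;> simp_all

lemma pvMain (g : String → Option Int) (cs : List String) :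
    (cs.foldl (pvStepA g) ([], 0)).1 =
      (let amounts := cs.map g
       let vals := amounts.filterMap pvTruthy
       let highest : Int := match vals with | [] => 0 | x :: xs => xs.foldl max x
       if highest ≤ 0 then []
       else (cs.zip amounts).filterMap (fun p => if p.2 = some highest then some p.1 else none)) := by
  show (cs.foldl (pvStepA g) ([], 0)).1 = _
  rw [pvFoldA_char g cs [] 0 le_rfl]
  have hM : pvHmax g cs 0 = ((cs.map g).filterMap pvTruthy).foldl max 0 :=
    pvHmax_eq_foldl_max g cs 0
  obtain ⟨l, hv⟩ : ∃ l, (cs.map g).filterMap pvTruthy = l := ⟨_, rfl⟩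
  rw [hv] at hM
  simp only [hv]
  cases l with
  | nil =>
    have h0 : pvHmax g cs 0 = 0 := by rw [hM]; rfl
    simp [h0]
  | cons x xs =>
    have hM2 : pvHmax g cs 0 = max 0 (xs.foldl max x) := by
      rw [hM, List.foldl_cons, show List.foldl max (max 0 x) xs = max 0 (xs.foldl max x) from foldl_max_pull xs 0 x]
    by_cases hBle : xs.foldl max x ≤ 0
    · have h0 : pvHmax g cs 0 = 0 := by omega
      simp [h0, hBle]
    · have hpos : pvHmax g cs 0 = xs.foldl max x := by omega
      have hne : ¬ (xs.foldl max x = 0) := by omega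
      simp only [hpos, if_neg hBle, if_neg hne, List.nil_append]
      exact (pvZip_filterMap g cs (xs.foldl max x)).symm

-- ===== VERDICT (by name: the statement is the Claim_ definition above) =====
theorem getMostValued_spec : Claim_equal_getMostValued := by
  intro dict cs _
  show getMostValued dict cs = getMostValued_alt dict cs
  unfold getMostValued getMostValued_alt
  exact pvMain (fun n => (PySem.Dict.ofList dict).get? n) cs
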